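-- pv_equiv track=rewrite | github.com/joonion/boj | Chap.57.숨바꼭질/12851.숨바꼭질2/solve.py | dfs
-- ===== SOURCE A (Python) =====
-- def dfs(n, k):
--     if n >= k:
--         return n - k, 1
--     elif k == 1: # n == 0
--         return 1, 1
--     elif k % 2 == 0: # k is even
--         opt, case = dfs(n, k // 2)
--         if k - n == 1 + opt:
--             return k - n, case + 1
--         elif k - n < 1 + opt:
--             return k - n, 1
--         else:
--             return 1 + opt, case
--     else: # k is odd
--         opt1, case1 = dfs(n, k + 1)
--         opt2, case2 = dfs(n, k - 1)
--         if opt1 == opt2: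
--             return 1 + opt1, case1 + case2
--         elif opt1 < opt2:
--             return 1 + opt1, case1
--         else:
--             return 1 + opt2, case2
-- ===== SOURCE B (Python) =====
-- def dfs(n, k):
--     # Backward DP over "level pairs": the recursion on k only ever needs the
--     # values at two consecutive positions (a, a+1) per halving level, so we
--     # compute them together, in O(log k) instead of A's exponential tree.
--
--     def even_step(v, sub):
--         # value at even position v from the value sub at v // 2
--         opt, case = sub
--         walk = v - n
--         if walk == 1 + opt:
--             return (walk, case + 1)
--         if walk < 1 + opt:
--             return (walk, 1)
--         return (1 + opt, case)
--
--     def odd_comb(up, down):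
--         # value at odd position v from the values at v + 1 (up) and v - 1 (down)
--         o1, c1 = up
--         o2, c2 = down
--         if o1 == o2:
--             return (1 + o1, c1 + c2)
--         if o1 < o2:
--             return (1 + o1, c1)
--         return (1 + o2, c2)
--
--     def fsmall(v):
--         # direct value at a bottom position (v <= n, or v in {1, 2})
--         if v <= n:
--             return (n - v, 1)
--         if v == 1:
--             return (1, 1)
--         if v == 2:
--             return even_step(2, fsmall(1))
--         return (0, 0)  # unreachable when dfs is called with k >= 1 or n >= k
--
--     def pair(a):
--         # returns (value at a, value at a + 1)
--         if a + 1 <= n or a <= 1: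
--             return fsmall(a), fsmall(a + 1)
--         if a % 2 == 0:
--             s0, s1 = pair(a // 2)
--             fa = (n - a, 1) if a <= n else even_step(a, s0)
--             fb = odd_comb(even_step(a + 2, s1), fa)
--         else:
--             s0, s1 = pair((a - 1) // 2)
--             fb = even_step(a + 1, s1)
--             fa = (n - a, 1) if a <= n else odd_comb(fb, even_step(a - 1, s0))
--         return fa, fb
--
--     if n >= k:
--         return n - k, 1
--     return pair(k)[0]
-- ===== Notes on version B (the rewrite author's own statement) =====
-- stated objective: alternative
-- what changed: A recomputes the backward recursion naively, branching into two recursive calls at every odd value; B observes that each halving level only ever needs the values at two consecutive positions (a, a+1) and computes both together in a single chain of pair steps, one per halving level.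
import Mathlib
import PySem

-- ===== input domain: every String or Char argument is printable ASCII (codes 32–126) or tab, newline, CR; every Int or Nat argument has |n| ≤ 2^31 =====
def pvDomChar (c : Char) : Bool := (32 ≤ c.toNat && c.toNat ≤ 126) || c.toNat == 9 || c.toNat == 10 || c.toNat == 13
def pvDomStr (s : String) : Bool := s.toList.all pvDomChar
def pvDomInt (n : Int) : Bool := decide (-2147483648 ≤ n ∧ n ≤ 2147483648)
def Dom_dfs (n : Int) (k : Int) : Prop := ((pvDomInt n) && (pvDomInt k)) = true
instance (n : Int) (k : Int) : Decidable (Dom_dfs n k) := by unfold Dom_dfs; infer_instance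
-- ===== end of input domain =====

-- B replaces A's branching recursion (two recursive calls at every odd value) by a single
-- chain of DP steps over pairs of consecutive positions, one pair per halving level.
-- Equality is proved on Pre_, exactly the inputs where A's Python returns.

-- ===== PORT A =====
-- A's recursion diverges (Python: RecursionError) for n < k ≤ 0, so the port
-- uses fuel; 2*k.toNat + 4 exceeds the recursion depth on every input in Pre_.
def dfsF (fuel : Nat) (n : Int) (k : Int) : Option (Int × Int) :=
  match fuel with
  | 0 => none
  | fuel + 1 =>
    if n ≥ k then some (n - k, 1)
    else if k = 1 then some (1, 1)
    else if PySem.Int.mod k 2 = 0 then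
      match dfsF fuel n (PySem.Int.floordiv k 2) with
      | none => none
      | some (opt, case) =>
        if k - n = 1 + opt then some (k - n, case + 1)
        else if k - n < 1 + opt then some (k - n, 1)
        else some (1 + opt, case)
    else
      match dfsF fuel n (k + 1), dfsF fuel n (k - 1) with
      | some (opt1, case1), some (opt2, case2) =>
        if opt1 = opt2 then some (1 + opt1, case1 + case2)
        else if opt1 < opt2 then some (1 + opt1, case1)
        else some (1 + opt2, case2)
      | _, _ => none

def dfs (n : Int) (k : Int) : Int × Int := (dfsF (2 * k.toNat + 4) n k).getD (0, 0)

-- ===== PORT B =====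
def evenStep (n : Int) (v : Int) (sub : Int × Int) : Int × Int :=
  let walk := v - n
  if walk = 1 + sub.1 then (walk, sub.2 + 1)
  else if walk < 1 + sub.1 then (walk, 1)
  else (1 + sub.1, sub.2)

def oddComb (up : Int × Int) (down : Int × Int) : Int × Int :=
  if up.1 = down.1 then (1 + up.1, up.2 + down.2)
  else if up.1 < down.1 then (1 + up.1, up.2)
  else (1 + down.1, down.2)

def fsmall (n : Int) (v : Int) : Int × Int :=
  if v ≤ n then (n - v, 1)
  else if v = 1 then (1, 1)
  else if v = 2 then evenStep n 2 (fsmall n 1)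
  else (0, 0)  -- unreachable when dfs is called with k ≥ 1 or n ≥ k
termination_by v.toNat
decreasing_by omega

def pairB (n : Int) (a : Int) : (Int × Int) × (Int × Int) :=
  if a + 1 ≤ n ∨ a ≤ 1 then (fsmall n a, fsmall n (a + 1))
  else if PySem.Int.mod a 2 = 0 then
    let s := pairB n (PySem.Int.floordiv a 2)
    let fa := if a ≤ n then (n - a, 1) else evenStep n a s.1
    let fb := oddComb (evenStep n (a + 2) s.2) fa
    (fa, fb)
  else
    let s := pairB n (PySem.Int.floordiv (a - 1) 2)
    let fb := evenStep n (a + 1) s.2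
    let fa := if a ≤ n then (n - a, 1) else oddComb fb (evenStep n (a - 1) s.1)
    (fa, fb)
termination_by a.toNat
decreasing_by
  · rw [PySem.Int.floordiv_eq_ediv_of_pos (by omega)]; omega
  · rw [PySem.Int.floordiv_eq_ediv_of_pos (by omega)]; omega

def dfs_alt (n : Int) (k : Int) : Int × Int :=
  if n ≥ k then (n - k, 1) else (pairB n k).1

-- ===== PRECONDITION & SPEC =====
-- Pre_ excludes exactly n < k ≤ 0, where A recurses forever (Python raises RecursionError).
def Pre_dfs (n : Int) (k : Int) : Prop := n ≥ k ∨ 1 ≤ k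
instance (n : Int) (k : Int) : Decidable (Pre_dfs n k) := by unfold Pre_dfs; infer_instance
def pvWitness_dfs : Int × Int := (3, 11)

def Spec_dfs (n : Int) (k : Int) (out : Int × Int) : Prop := out = dfs_alt n k
instance (n : Int) (k : Int) (out : Int × Int) : Decidable (Spec_dfs n k out) := by unfold Spec_dfs; infer_instance

-- ===== CLAIM (what is proved, stated in full; the proofs are below) =====
def Claim_equal_dfs : Prop := ∀ (n : Int) (k : Int), Dom_dfs n k → Pre_dfs n k → Spec_dfs n k (dfs n k)

-- ===== LEMMAS AND PROOFS =====

-- the common mathematical value of both programs: A's recursion, totalised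
-- outside Pre_ with a junk value so well-founded recursion goes through
def specF (n : Int) (k : Int) : Int × Int :=
  if n ≥ k then (n - k, 1)
  else if k ≤ 0 then (0, 0)
  else if k = 1 then (1, 1)
  else if k % 2 = 0 then evenStep n k (specF n (k / 2))
  else oddComb (specF n (k + 1)) (specF n (k - 1))
termination_by (2 * k.toNat + (if k % 2 = 1 ∧ 3 ≤ k then 3 else 0) : Nat)
decreasing_by
  · split_ifs <;> omega
  · split_ifs <;> omega
  · split_ifs <;> omega

theorem specF_base (n : Int) (k : Int) (h : n ≥ k) : specF n k = (n - k, 1) := by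
  rw [specF, if_pos h]

theorem specF_one (n : Int) (h : ¬ n ≥ 1) : specF n 1 = (1, 1) := by
  rw [specF]; norm_num [h]

theorem specF_even (n : Int) (k : Int) (h1 : ¬ n ≥ k) (h0 : ¬ k ≤ 0) (h2 : k ≠ 1)
    (h4 : k % 2 = 0) : specF n k = evenStep n k (specF n (k / 2)) := by
  conv_lhs => rw [specF]
  rw [if_neg h1, if_neg h0, if_neg h2, if_pos h4]

theorem specF_odd (n : Int) (k : Int) (h1 : ¬ n ≥ k) (h0 : ¬ k ≤ 0) (h2 : k ≠ 1)
    (h4 : ¬ k % 2 = 0) : specF n k = oddComb (specF n (k + 1)) (specF n (k - 1)) := by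
  conv_lhs => rw [specF]
  rw [if_neg h1, if_neg h0, if_neg h2, if_neg h4]

theorem specF_fst_nonneg (n : Int) (k : Int) : 0 ≤ (specF n k).1 := by
  induction k using specF.induct (n := n) with
  | case1 k h => rw [specF_base n k h]; omega
  | case2 k h1 h2 => rw [specF, if_neg h1, if_pos h2]
  | case3 h1 h2 => rw [specF_one n h1]; omega
  | case4 k h1 h2 h3 h4 ih =>
      rw [specF_even n k h1 h2 h3 h4]
      unfold evenStep; dsimp only; split_ifs <;> dsimp only <;> omega
  | case5 k h1 h2 h3 h4 ih1 ih2 =>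
      rw [specF_odd n k h1 h2 h3 h4]
      unfold oddComb; split_ifs <;> dsimp only <;> omega

theorem dfsF_eq_specF (n : Int) (fuel : Nat) : ∀ (k : Int), Pre_dfs n k →
    2 * k.toNat + (if k % 2 = 1 ∧ 3 ≤ k then 3 else 0) < fuel →
    dfsF fuel n k = some (specF n k) := by
  induction fuel with
  | zero => intro k _ h; omega
  | succ m ih =>
    intro k hpre hfuel
    rw [dfsF]
    by_cases h1 : n ≥ k
    · rw [if_pos h1, specF_base n k h1]
    · have hk1 : 1 ≤ k := by rcases hpre with h | h <;> omega
      simp only [if_neg h1]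
      by_cases h2 : k = 1
      · subst h2; rw [if_pos rfl, specF_one n h1]
      · simp only [if_neg h2]
        have hknot0 : ¬ k ≤ 0 := by omega
        rw [PySem.Int.mod_eq_emod_of_pos (by omega)]
        by_cases h4 : k % 2 = 0
        · -- even branch
          have hsub : dfsF m n (PySem.Int.floordiv k 2) = some (specF n (k / 2)) := by
            rw [PySem.Int.floordiv_eq_ediv_of_pos (by omega)]
            apply ih _ (Or.inr (by omega))
            split_ifs at hfuel ⊢ <;> omega
          rw [if_pos h4, hsub, specF_even n k h1 hknot0 h2 h4]
          rcases specF n (k / 2) with ⟨opt, case⟩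
          unfold evenStep
          dsimp only
          split_ifs <;> rfl
        · -- odd branch
          have hk3 : 3 ≤ k := by omega
          have hsub1 : dfsF m n (k + 1) = some (specF n (k + 1)) := by
            apply ih _ (Or.inr (by omega)); split_ifs at hfuel ⊢ <;> omega
          have hsub2 : dfsF m n (k - 1) = some (specF n (k - 1)) := by
            apply ih _ (Or.inr (by omega)); split_ifs at hfuel ⊢ <;> omega
          rw [if_neg h4, hsub1, hsub2, specF_odd n k h1 hknot0 h2 h4]
          rcases specF n (k + 1) with ⟨o1, c1⟩
          rcases specF n (k - 1) with ⟨o2, c2⟩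
          unfold oddComb
          dsimp only
          split_ifs <;> rfl

theorem fsmall_one_eq_specF (n : Int) : fsmall n 1 = specF n 1 := by
  by_cases hn : 1 ≤ n
  · rw [fsmall, if_pos hn, specF_base n 1 hn]
  · rw [fsmall, if_neg (by omega), if_pos rfl, specF_one n (by omega)]

theorem fsmall_eq_specF (n : Int) (v : Int) (h : v ≤ n ∨ v = 1 ∨ v = 2) :
    fsmall n v = specF n v := by
  rcases h with h | h | h
  · rw [fsmall, if_pos h, specF_base n v h]
  · subst h; exact fsmall_one_eq_specF n
  · subst h
    by_cases hn : 2 ≤ n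
    · rw [fsmall, if_pos hn, specF_base n 2 hn]
    · rw [fsmall, if_neg (by omega), if_neg (by norm_num), if_pos rfl, fsmall_one_eq_specF n,
        specF_even n 2 (by omega) (by norm_num) (by norm_num) (by norm_num)]
      norm_num

theorem pairB_eq_specF (n : Int) (a : Int) (ha : 1 ≤ a) :
    pairB n a = (specF n a, specF n (a + 1)) := by
  by_cases hbase : a + 1 ≤ n ∨ a ≤ 1
  · rw [pairB, if_pos hbase]
    rcases hbase with h | h
    · rw [fsmall_eq_specF n a (by omega), fsmall_eq_specF n (a + 1) (by omega)]
    · have ha1 : a = 1 := by omega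
      subst ha1
      rw [show (1:Int) + 1 = 2 by norm_num, fsmall_eq_specF n 1 (by omega),
        fsmall_eq_specF n 2 (by omega)]
  · have ha2 : 2 ≤ a := by omega
    have hna : n ≤ a := by omega
    rw [pairB, if_neg hbase, PySem.Int.mod_eq_emod_of_pos (by omega)]
    by_cases hev : a % 2 = 0
    · -- a even
      rw [if_pos hev]
      have hs : pairB n (PySem.Int.floordiv a 2) = (specF n (a / 2), specF n (a / 2 + 1)) := by
        rw [PySem.Int.floordiv_eq_ediv_of_pos (by omega)]
        exact pairB_eq_specF n (a / 2) (by omega)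
      rw [hs]; dsimp only
      have hfa : (if a ≤ n then ((n - a, 1) : Int × Int) else evenStep n a (specF n (a / 2)))
          = specF n a := by
        by_cases hc : a ≤ n
        · rw [if_pos hc, specF_base n a hc]
        · rw [if_neg hc, specF_even n a hc (by omega) (by omega) hev]
      have hfa2 : evenStep n (a + 2) (specF n (a / 2 + 1)) = specF n (a + 2) := by
        rw [specF_even n (a + 2) (by omega) (by omega) (by omega) (by omega),
          show (a + 2) / 2 = a / 2 + 1 by omega]
      rw [hfa, hfa2, specF_odd n (a + 1) (by omega) (by omega) (by omega) (by omega),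
        show a + 1 + 1 = a + 2 by ring, show a + 1 - 1 = a by ring]
    · -- a odd
      rw [if_neg hev]
      have ha3 : 3 ≤ a := by omega
      have hs : pairB n (PySem.Int.floordiv (a - 1) 2)
          = (specF n ((a - 1) / 2), specF n ((a - 1) / 2 + 1)) := by
        rw [PySem.Int.floordiv_eq_ediv_of_pos (by omega)]
        exact pairB_eq_specF n ((a - 1) / 2) (by omega)
      rw [hs]; dsimp only
      have hfb : evenStep n (a + 1) (specF n ((a - 1) / 2 + 1)) = specF n (a + 1) := by
        rw [specF_even n (a + 1) (by omega) (by omega) (by omega) (by omega),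
          show (a + 1) / 2 = (a - 1) / 2 + 1 by omega]
      rw [hfb]
      by_cases hc : a ≤ n
      · rw [if_pos hc, specF_base n a hc]
      · have hfm1 : evenStep n (a - 1) (specF n ((a - 1) / 2)) = specF n (a - 1) := by
          by_cases hd : n < a - 1
          · rw [specF_even n (a - 1) (by omega) (by omega) (by omega) (by omega)]
          · -- n = a - 1 exactly (a odd and not base forces n < a, so n = a - 1)
            have hnn := specF_fst_nonneg n ((a - 1) / 2)
            rw [specF_base n (a - 1) (by omega)]
            unfold evenStep
            dsimp only
            rw [if_neg (by omega), if_pos (by omega)]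
            have hne : n = a - 1 := by omega
            rw [hne]
        rw [if_neg hc, hfm1, specF_odd n a (by omega) (by omega) (by omega) hev]
termination_by a.toNat
decreasing_by · omega
              · omega

theorem dfs_alt_eq_specF (n : Int) (k : Int) (h : Pre_dfs n k) : dfs_alt n k = specF n k := by
  unfold dfs_alt
  by_cases h1 : n ≥ k
  · rw [if_pos h1, specF_base n k h1]
  · have hk : 1 ≤ k := by rcases h with h | h <;> omega
    rw [if_neg h1, pairB_eq_specF n k hk]

-- ===== VERDICT (by name: the statement is the Claim_ definition above) =====
theorem dfs_spec : Claim_equal_dfs := by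
  intro n k _ hpre
  unfold Spec_dfs dfs
  rw [dfsF_eq_specF n (2 * k.toNat + 4) k hpre (by split_ifs <;> omega)]
  rw [dfs_alt_eq_specF n k hpre]
  rfl
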